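-- pv_equiv track=rewrite | github.com/knightd80/AdventOfCode2021 | Day 4/bingo2.py | checkForWinningCard
-- ===== SOURCE A (Python) =====
-- def checkForWinningCard(bingoCard):
--     # check rows
--     for x in range(5):
--         for y in range(5):
--             if "C" not in bingoCard[x][y]:
--                 break
--             elif y == 4:
--                 winningCard = bingoCard.copy()
--                 return bingoCard
--     # check columns
--     for y in range(5):
--         for x in range(5):
--             if "C" not in bingoCard[x][y]:
--                 break
--             elif x == 4:
--                 winningCard = bingoCard.copy()
--                 return bingoCard
--     return []
-- ===== SOURCE B (Python) =====
-- def checkForWinningCard(bingoCard):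
--     # single pass over all 25 cells maintaining per-row and per-column mark tallies
--     rowCount = [0] * 5
--     colCount = [0] * 5
--     for x in range(5):
--         for y in range(5):
--             marked = "C" in bingoCard[x][y]
--             rowCount[x] += marked
--             colCount[y] += marked
--     if 5 in rowCount or 5 in colCount:
--         return bingoCard
--     return []
-- ===== Notes on version B (the rewrite author's own statement) =====
-- stated objective: alternative
-- what changed: B makes one pass over all 25 cells maintaining rowCount/colCount tally arrays and afterwards checks the tallies for a 5, instead of A's two staged nested scans with per-line early break and mid-loop return.
-- outside the precondition, e.g. on checkForWinningCard([['C', 'C', 'C', 'C', 'C']]): A returns [['C', 'C', 'C', 'C', 'C']], B raises IndexError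
import Mathlib
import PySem

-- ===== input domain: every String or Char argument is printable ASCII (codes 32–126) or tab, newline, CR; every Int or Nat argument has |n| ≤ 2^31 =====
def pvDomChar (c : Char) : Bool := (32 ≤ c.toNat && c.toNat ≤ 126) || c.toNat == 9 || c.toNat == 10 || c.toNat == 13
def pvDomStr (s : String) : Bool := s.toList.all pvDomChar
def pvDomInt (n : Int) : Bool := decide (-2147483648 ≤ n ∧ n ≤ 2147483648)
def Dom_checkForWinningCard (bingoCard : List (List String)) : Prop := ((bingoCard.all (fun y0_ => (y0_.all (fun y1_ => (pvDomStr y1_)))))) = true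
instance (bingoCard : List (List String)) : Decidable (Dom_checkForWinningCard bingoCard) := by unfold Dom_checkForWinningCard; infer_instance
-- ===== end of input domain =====

-- B replaces A's two staged early-break line scans by one pass over the 25 cells that
-- maintains per-row and per-column mark tallies, checked afterwards (objective: alternative).


-- ===== PORT A =====
-- bingoCard[x][y] and the '"C" in …' test; indexing is exact for in-range indices,
-- which Pre_ guarantees (Python raises IndexError outside it).
def pvCellA (bingoCard : List (List String)) (x y : Nat) : String :=
  ((bingoCard.getD x []).getD y "")

def pvMarkA (bingoCard : List (List String)) (x y : Nat) : Bool :=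
  PySem.Str.isIn "C" (pvCellA bingoCard x y)

-- the inner 'for … in range(5): if not mark: break; elif idx == 4: return' loop:
-- true iff the loop hits the return
def pvScanLine (isMark : Nat → Bool) : List Nat → Bool
  | [] => false
  | y :: ys => if isMark y = false then false else if y == 4 then true else pvScanLine isMark ys

-- the outer loop: true iff some iteration returned
def pvLoopA (hit : Nat → Bool) : List Nat → Bool
  | [] => false
  | i :: is => if hit i then true else pvLoopA hit is

def checkForWinningCard (bingoCard : List (List String)) : List (List String) :=
  if pvLoopA (fun x => pvScanLine (fun y => pvMarkA bingoCard x y) [0, 1, 2, 3, 4]) [0, 1, 2, 3, 4] then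
    bingoCard
  else if pvLoopA (fun y => pvScanLine (fun x => pvMarkA bingoCard x y) [0, 1, 2, 3, 4]) [0, 1, 2, 3, 4] then
    bingoCard
  else []

-- ===== PORT B =====
def pvCellB (bingoCard : List (List String)) (x y : Nat) : String :=
  ((bingoCard.getD x []).getD y "")

def pvMarkB (bingoCard : List (List String)) (x y : Nat) : Bool :=
  PySem.Str.isIn "C" (pvCellB bingoCard x y)

-- one body of the nested loop: rowCount[x] += marked; colCount[y] += marked
def pvStepB (bingoCard : List (List String)) (st : List Nat × List Nat) (xy : Nat × Nat) :
    List Nat × List Nat :=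
  let marked : Nat := if pvMarkB bingoCard xy.1 xy.2 then 1 else 0
  (st.1.set xy.1 (st.1.getD xy.1 0 + marked), st.2.set xy.2 (st.2.getD xy.2 0 + marked))

def checkForWinningCard_alt (bingoCard : List (List String)) : List (List String) :=
  let st := ((List.range 5).flatMap (fun x => (List.range 5).map (fun y => (x, y)))).foldl
      (pvStepB bingoCard) ([0, 0, 0, 0, 0], [0, 0, 0, 0, 0])
  if (5 : Nat) ∈ st.1 ∨ (5 : Nat) ∈ st.2 then bingoCard else []

-- ===== PRECONDITION & SPEC =====
-- Pre_ is the natural domain: a card with at least 5 rows whose first 5 rows have at least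
-- 5 cells each (a 5x5 bingo card; extra rows/cells are ignored by both programs).  A raises
-- IndexError on smaller cards except on some whose early break or return happens to skip the
-- missing cells (e.g. a one-row all-marked card), where B raises; those are excluded.
def Pre_checkForWinningCard (bingoCard : List (List String)) : Prop :=
  5 ≤ bingoCard.length ∧ ∀ row ∈ bingoCard.take 5, 5 ≤ row.length
instance (bingoCard : List (List String)) : Decidable (Pre_checkForWinningCard bingoCard) := by
  unfold Pre_checkForWinningCard; infer_instance

def pvWitness_checkForWinningCard : List (List String) :=
  [["C", "C", "C", "C", "C"], ["x", "x", "x", "x", "x"], ["x", "x", "x", "x", "x"],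
   ["x", "x", "x", "x", "x"], ["x", "x", "x", "x", "x"]]

def Spec_checkForWinningCard (bingoCard : List (List String)) (out : List (List String)) : Prop := out = checkForWinningCard_alt bingoCard
instance (bingoCard : List (List String)) (out : List (List String)) : Decidable (Spec_checkForWinningCard bingoCard out) := by unfold Spec_checkForWinningCard; infer_instance

-- ===== CLAIM (what is proved, stated in full; the proofs are below) =====
def Claim_equal_checkForWinningCard : Prop := ∀ (bingoCard : List (List String)), Dom_checkForWinningCard bingoCard → Pre_checkForWinningCard bingoCard → Spec_checkForWinningCard bingoCard (checkForWinningCard bingoCard)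

-- ===== LEMMAS AND PROOFS =====

-- A's inner loop returns iff all five cells of the line are marked
theorem pvScanLine_eq (g : Nat → Bool) :
    pvScanLine g [0, 1, 2, 3, 4] = (g 0 && g 1 && g 2 && g 3 && g 4) := by
  cases h0 : g 0 <;> cases h1 : g 1 <;> cases h2 : g 2 <;> cases h3 : g 3 <;> cases h4 : g 4 <;>
    simp [pvScanLine, h0, h1, h2, h3, h4]

-- A's outer loop returns iff some line scan returned
theorem pvLoopA_eq (h : Nat → Bool) :
    pvLoopA h [0, 1, 2, 3, 4] = (h 0 || h 1 || h 2 || h 3 || h 4) := by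
  cases h0 : h 0 <;> cases h1 : h 1 <;> cases h2 : h 2 <;> cases h3 : h 3 <;> cases h4 : h 4 <;>
    simp [pvLoopA, h0, h1, h2, h3, h4]

theorem pvMark_eq (bingoCard : List (List String)) (x y : Nat) :
    pvMarkA bingoCard x y = pvMarkB bingoCard x y := rfl

-- a five-cell tally reaches 5 iff every cell of the line is marked
theorem pvSum_eq_five (m0 m1 m2 m3 m4 : Bool) :
    (5 = (0 + (if m0 then 1 else 0) + (if m1 then 1 else 0) + (if m2 then 1 else 0)
        + (if m3 then 1 else 0) + (if m4 then 1 else 0) : Nat))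
      ↔ (m0 && m1 && m2 && m3 && m4) = true := by
  cases m0 <;> cases m1 <;> cases m2 <;> cases m3 <;> cases m4 <;> simp

-- collapse A's two ifs into one
theorem pv_if_if (a b : Bool) (c e : List (List String)) :
    (if a then c else if b then c else e) = if (a || b) then c else e := by
  cases a <;> simp

-- ===== VERDICT (by name: the statement is the Claim_ definition above) =====
theorem checkForWinningCard_spec : Claim_equal_checkForWinningCard := by
  intro card _dom _pre
  show checkForWinningCard card = checkForWinningCard_alt card
  unfold checkForWinningCard checkForWinningCard_alt
  rw [pv_if_if]
  simp only [pvLoopA_eq, pvScanLine_eq, pvMark_eq]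
  rw [show ((List.range 5).flatMap (fun x => (List.range 5).map (fun y => (x, y))))
        = [(0,0),(0,1),(0,2),(0,3),(0,4),(1,0),(1,1),(1,2),(1,3),(1,4),
           (2,0),(2,1),(2,2),(2,3),(2,4),(3,0),(3,1),(3,2),(3,3),(3,4),
           (4,0),(4,1),(4,2),(4,3),(4,4)] from rfl]
  simp only [List.foldl, pvStepB, List.set, List.getD, List.getElem?_cons_zero,
    List.getElem?_cons_succ, Option.getD_some, List.mem_cons, List.not_mem_nil, or_false]
  refine if_congr ?_ rfl rfl
  simp only [pvSum_eq_five, Bool.or_eq_true, or_assoc]
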